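-- pv_equiv track=rewrite | github.com/lelilia/Advent-of-Code-2024 | day9.py | rearrange_file
-- ===== SOURCE A (Python) =====
-- def rearrange_file(file):
--     new_file = []
--     while file:
--
--         x = file.pop(0)
--         if x != -1:
--             new_file.append(x)
--         else:
--             while file and x == -1:
--                 x = file.pop()
--             if x != -1:
--                 new_file.append(x)
--     return new_file
-- ===== SOURCE B (Python) =====
-- def rearrange_file(file):
--     # Two-pointer single pass; does NOT mutate `file` (A empties it) -- return value only.
--     out = []
--     i, j = 0, len(file) - 1
--     while i <= j:
--         x = file[i]
--         i += 1
--         if x != -1: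
--             out.append(x)
--         else:
--             while j >= i and x == -1:
--                 x = file[j]
--                 j -= 1
--             if x != -1:
--                 out.append(x)
--     return out
-- ===== Notes on version B (the rewrite author's own statement) =====
-- stated objective: faster
-- what changed: Replaced the destructive pop(0)/pop() while-loop (each pop(0) shifts the whole list) by a non-mutating two-pointer single pass over the original list.
import Mathlib
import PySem

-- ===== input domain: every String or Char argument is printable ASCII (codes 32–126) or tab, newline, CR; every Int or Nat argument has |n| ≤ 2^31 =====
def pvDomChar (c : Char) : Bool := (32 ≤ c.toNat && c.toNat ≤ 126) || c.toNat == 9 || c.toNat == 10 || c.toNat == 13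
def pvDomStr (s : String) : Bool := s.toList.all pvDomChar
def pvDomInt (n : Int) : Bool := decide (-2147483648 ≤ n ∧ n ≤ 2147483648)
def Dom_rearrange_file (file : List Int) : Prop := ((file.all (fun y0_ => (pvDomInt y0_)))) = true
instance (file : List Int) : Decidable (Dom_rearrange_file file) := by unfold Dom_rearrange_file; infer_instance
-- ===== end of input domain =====

-- B replaces A's quadratic pop(0)/pop() mutation loop by a two-pointer single pass (objective: faster).
-- A empties its argument in place; B does not mutate it — the equivalence proved here is about the RETURN value only.

-- ===== PORT A =====
-- inner 'while file and x == -1: x = file.pop()' loop of A; fuel = list length bounds the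
-- iteration count (each step pops one element) and is only a totality guard
def aInnerGo : Nat → List Int → Int → List Int × Int
  | 0, file, x => (file, x)
  | n + 1, file, x =>
      if file ≠ [] ∧ x = -1 then aInnerGo n file.dropLast file.getLast!
      else (file, x)

-- outer 'while file:' loop of A; fuel = list length (each iteration pops at least the head)
def aLoopGo : Nat → List Int → List Int → List Int
  | 0, _, acc => acc
  | n + 1, file, acc =>
      match file with
      | [] => acc
      | x :: rest =>
          if x ≠ -1 then aLoopGo n rest (acc ++ [x])
          else
            let p := aInnerGo rest.length rest x
            aLoopGo n p.1 (if p.2 ≠ -1 then acc ++ [p.2] else acc)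

def rearrange_file (file : List Int) : List Int := aLoopGo file.length file []

-- ===== PORT B =====
-- inner 'while j >= i and x == -1' loop of B; fuel = remaining window size, a totality guard;
-- file[j] with 0 ≤ i ≤ j < len is exact as getD
def bInnerGo : Nat → List Int → Int → Int → Int → Int × Int
  | 0, _, _, j, x => (j, x)
  | n + 1, file, i, j, x =>
      if i ≤ j ∧ x = -1 then bInnerGo n file i (j - 1) (file.getD j.toNat 0)
      else (j, x)

-- outer 'while i <= j' loop of B; fuel = initial window size; file[i] with 0 ≤ i ≤ j < len is exact as getD
def bLoopGo : Nat → List Int → Int → Int → List Int → List Int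
  | 0, _, _, _, acc => acc
  | n + 1, file, i, j, acc =>
      if i ≤ j then
        let x := file.getD i.toNat 0
        if x ≠ -1 then bLoopGo n file (i + 1) j (acc ++ [x])
        else
          let p := bInnerGo (j - i).toNat file (i + 1) j x
          bLoopGo n file (i + 1) p.1 (if p.2 ≠ -1 then acc ++ [p.2] else acc)
      else acc

def rearrange_file_alt (file : List Int) : List Int :=
  bLoopGo file.length file 0 (file.length - 1) []

-- ===== PRECONDITION & SPEC =====
def Spec_rearrange_file (file : List Int) (out : List Int) : Prop := out = rearrange_file_alt file
instance (file : List Int) (out : List Int) : Decidable (Spec_rearrange_file file out) := by unfold Spec_rearrange_file; infer_instance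

-- ===== CLAIM (what is proved, stated in full; the proofs are below) =====
def Claim_equal_rearrange_file : Prop := ∀ (file : List Int), Dom_rearrange_file file → Spec_rearrange_file file (rearrange_file file)

-- ===== LEMMAS AND PROOFS =====
-- seg file i j is the Python slice file[i : j+1] that B's pointers (i, j) delimit
def seg (file : List Int) (i j : Int) : List Int :=
  (file.drop i.toNat).take (j + 1 - i).toNat

theorem seg_nil (file : List Int) (i j : Int) (h : j < i) : seg file i j = [] := by
  unfold seg
  have h0 : (j + 1 - i).toNat = 0 := by omega
  simp [h0]

theorem seg_length (file : List Int) (i j : Int) (h0 : 0 ≤ i) (hj : j < file.length) :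
    (seg file i j).length = (j + 1 - i).toNat := by
  unfold seg
  simp
  omega

theorem seg_cons (file : List Int) (i j : Int) (h0 : 0 ≤ i) (hij : i ≤ j)
    (hj : j < file.length) (hi : i.toNat < file.length) :
    seg file i j = file[i.toNat] :: seg file (i + 1) j := by
  unfold seg
  rw [List.drop_eq_getElem_cons hi]
  have h1 : (j + 1 - i).toNat = (j + 1 - (i + 1)).toNat + 1 := by omega
  have h2 : (i + 1).toNat = i.toNat + 1 := by omega
  rw [h1, h2, List.take_succ_cons]

theorem seg_snoc (file : List Int) (i j : Int) (h0 : 0 ≤ i) (hij : i ≤ j)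
    (hj : j < file.length) (hjn : j.toNat < file.length) :
    seg file i j = seg file i (j - 1) ++ [file[j.toNat]] := by
  unfold seg
  have h1 : (j + 1 - i).toNat = (j - 1 + 1 - i).toNat + 1 := by omega
  rw [h1, List.take_add_one]
  congr 1
  have hgt : (file.drop i.toNat)[(j - 1 + 1 - i).toNat]? = some file[j.toNat] := by
    rw [List.getElem?_drop]
    have h2 : i.toNat + (j - 1 + 1 - i).toNat = j.toNat := by omega
    rw [h2, List.getElem?_eq_getElem hjn]
  rw [hgt]
  rfl

theorem bInnerGo_le (file : List Int) (n : Nat) :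
    ∀ (i j x : Int), (bInnerGo n file i j x).1 ≤ j := by
  induction n with
  | zero => intro i j x; exact le_refl j
  | succ n ih =>
      intro i j x
      rw [bInnerGo]
      split
      · exact le_trans (ih i (j - 1) (file.getD j.toNat 0)) (by omega)
      · exact le_refl j

theorem inner_eq (file : List Int) (n : Nat) :
    ∀ (i j x : Int), 0 ≤ i → j < file.length → n = (j + 1 - i).toNat →
    aInnerGo n (seg file i j) x
      = (seg file i (bInnerGo n file i j x).1, (bInnerGo n file i j x).2) := by
  induction n with
  | zero =>
      intro i j x h0 hj hn
      have hji : j < i := by omega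
      rw [aInnerGo, bInnerGo, seg_nil file i j hji]
  | succ n ih =>
      intro i j x h0 hj hn
      have hij : i ≤ j := by omega
      have hjn : j.toNat < file.length := by omega
      have hseg := seg_snoc file i j h0 hij hj hjn
      rw [aInnerGo, bInnerGo]
      by_cases hx : x = -1
      · have hne : seg file i j ≠ [] := by rw [hseg]; simp
        rw [if_pos ⟨hne, hx⟩, if_pos ⟨hij, hx⟩]
        have hdl : (seg file i j).dropLast = seg file i (j - 1) := by
          rw [hseg, List.dropLast_concat]
        have hgl : (seg file i j).getLast! = file[j.toNat] := by
          rw [hseg]; simp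
        have hgd : file.getD j.toNat 0 = file[j.toNat] := List.getD_eq_getElem file 0 hjn
        rw [hdl, hgl, ← hgd]
        exact ih i (j - 1) (file.getD j.toNat 0) h0 (by omega) (by omega)
      · rw [if_neg (by simp [hx]), if_neg (by simp [hx])]

theorem loop_eq (file : List Int) (n : Nat) :
    ∀ (i j : Int) (acc : List Int), 0 ≤ i → j < file.length → (j + 1 - i).toNat ≤ n →
    bLoopGo n file i j acc = aLoopGo n (seg file i j) acc := by
  induction n with
  | zero => intro i j acc h0 hj hn; rw [aLoopGo, bLoopGo]
  | succ n ih =>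
      intro i j acc h0 hj hn
      rw [bLoopGo]
      by_cases hij : i ≤ j
      · rw [if_pos hij]
        have hin : i.toNat < file.length := by omega
        have hxv : file.getD i.toNat 0 = file[i.toNat] := List.getD_eq_getElem file 0 hin
        rw [seg_cons file i j h0 hij hj hin, aLoopGo]
        by_cases hx : file[i.toNat] ≠ -1
        · rw [if_pos (by rw [hxv]; exact hx), if_pos hx, hxv]
          exact ih (i + 1) j (acc ++ [file[i.toNat]]) (by omega) hj (by omega)
        · rw [if_neg (by rw [hxv]; exact hx), if_neg hx]
          have hlen : (seg file (i + 1) j).length = (j - i).toNat := by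
            rw [seg_length file (i + 1) j (by omega) hj]
            congr 1
            omega
          have hinner := inner_eq file (j - i).toNat (i + 1) j (file.getD i.toNat 0)
            (by omega) hj (by omega)
          rw [hlen, ← hxv, hinner]
          have hple := bInnerGo_le file (j - i).toNat (i + 1) j (file.getD i.toNat 0)
          exact ih (i + 1) _ _ (by omega) (by omega) (by omega)
      · rw [if_neg hij, seg_nil file i j (by omega), aLoopGo]

theorem seg_full (file : List Int) : seg file 0 ((file.length : Int) - 1) = file := by
  unfold seg
  have h : ((file.length : Int) - 1 + 1 - 0).toNat = file.length := by omega
  rw [h]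
  simp

-- ===== VERDICT (by name: the statement is the Claim_ definition above) =====
theorem rearrange_file_spec : Claim_equal_rearrange_file := by
  intro file _
  unfold Spec_rearrange_file rearrange_file rearrange_file_alt
  rw [loop_eq file file.length 0 ((file.length : Int) - 1) [] (by omega) (by omega) (by omega),
    seg_full]
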